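-- pv_equiv track=rewrite | github.com/svjack/ConsisID | util/dataloader.py | get_valid_segments
-- ===== SOURCE A (Python) =====
-- def get_valid_segments(valid_frame, tolerance=5):
--     valid_positions = sorted(set(valid_frame['face']).union(set(valid_frame['head'])))
--
--     valid_segments = []
--     current_segment = [valid_positions[0]]
--
--     for i in range(1, len(valid_positions)):
--         if valid_positions[i] - valid_positions[i - 1] <= tolerance:
--             current_segment.append(valid_positions[i])
--         else:
--             valid_segments.append(current_segment)
--             current_segment = [valid_positions[i]]
--
--     if current_segment:
--         valid_segments.append(current_segment)
--
--     return valid_segments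
-- ===== SOURCE B (Python) =====
-- def get_valid_segments(valid_frame, tolerance=5):
--     valid_positions = sorted(set(valid_frame['face']).union(set(valid_frame['head'])))
--     # pass 1: cut indices where the gap exceeds the tolerance
--     cuts = [i + 1 for i, (a, b) in enumerate(zip(valid_positions, valid_positions[1:]))
--             if b - a > tolerance]
--     # pass 2: slice between consecutive bounds
--     bounds = [0] + cuts + [len(valid_positions)]
--     return [valid_positions[b:e] for b, e in zip(bounds, bounds[1:])]
-- ===== Notes on version B (the rewrite author's own statement) =====
-- stated objective: alternative
-- what changed: B replaces A's single accumulator loop (current_segment + trailing flush) by two staged passes: first compute the list of cut indices where the gap exceeds the tolerance, then build the segments by slicing the sorted positions between consecutive bounds.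
import Mathlib
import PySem

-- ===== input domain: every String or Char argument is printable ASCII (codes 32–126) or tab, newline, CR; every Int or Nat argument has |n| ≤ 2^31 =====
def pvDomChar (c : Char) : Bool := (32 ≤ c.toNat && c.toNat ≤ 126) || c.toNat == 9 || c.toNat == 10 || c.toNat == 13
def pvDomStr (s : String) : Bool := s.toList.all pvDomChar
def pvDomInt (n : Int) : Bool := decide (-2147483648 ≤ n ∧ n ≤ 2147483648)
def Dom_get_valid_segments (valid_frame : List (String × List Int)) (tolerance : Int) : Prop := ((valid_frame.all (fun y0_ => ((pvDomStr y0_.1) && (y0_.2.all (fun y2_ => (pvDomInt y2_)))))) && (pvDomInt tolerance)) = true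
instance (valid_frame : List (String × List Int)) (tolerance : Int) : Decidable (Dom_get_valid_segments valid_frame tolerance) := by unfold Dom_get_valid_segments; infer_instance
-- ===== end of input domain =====

-- B replaces A's accumulator loop by two staged passes: compute the gap cut indices first,
-- then build the segments by slicing between consecutive bounds (objective: alternative).

-- ===== PORT A =====
-- A's 'for i in range(1, len(..))' reads positions[i] and positions[i-1]; the fold walks the same
-- tail carrying prev = positions[i-1] (the same value) alongside A's (valid_segments, current_segment) state.
def get_valid_segments (valid_frame : List (String × List Int)) (tolerance : Int) : List (List Int) :=
  let face := (PySem.Dict.mk valid_frame).getD "face" []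
  let head := (PySem.Dict.mk valid_frame).getD "head" []
  let valid_positions := PySem.List.sorted (PySem.Set.union (PySem.Set.ofList face) (PySem.Set.ofList head)) (fun x => x) false
  match valid_positions with
  | [] => []   -- Python raises IndexError at valid_positions[0]; excluded by Pre_
  | p0 :: rest =>
    let st := rest.foldl
      (fun (st : List (List Int) × List Int × Int) x =>
        if x - st.2.2 ≤ tolerance then (st.1, st.2.1 ++ [x], x)
        else (st.1 ++ [st.2.1], [x], x))
      ([], [p0], p0)
    if st.2.1 = [] then st.1 else st.1 ++ [st.2.1]

-- ===== PORT B =====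
def get_valid_segments_alt (valid_frame : List (String × List Int)) (tolerance : Int) : List (List Int) :=
  let face := (PySem.Dict.mk valid_frame).getD "face" []
  let head := (PySem.Dict.mk valid_frame).getD "head" []
  let valid_positions := PySem.List.sorted (PySem.Set.union (PySem.Set.ofList face) (PySem.Set.ofList head)) (fun x => x) false
  -- cuts = [i + 1 for i, (a, b) in enumerate(zip(pos, pos[1:])) if b - a > tolerance]
  let cuts := ((PySem.List.enumerate (valid_positions.zip (PySem.List.slice valid_positions (some 1) none))).filter
      (fun p => decide (tolerance < p.2.2 - p.2.1))).map (fun p => p.1 + 1)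
  -- bounds = [0] + cuts + [len(pos)]
  let bounds := (0 : Int) :: (cuts ++ [(valid_positions.length : Int)])
  -- [pos[b:e] for b, e in zip(bounds, bounds[1:])]
  (bounds.zip (PySem.List.slice bounds (some 1) none)).map
    (fun be => PySem.List.slice valid_positions (some be.1) (some be.2))

-- ===== PRECONDITION & SPEC =====
-- Pre_ excludes exactly the inputs where Python A raises: a missing 'face'/'head' key (KeyError)
-- and the case where both lists are empty (IndexError on valid_positions[0]).
def Pre_get_valid_segments (valid_frame : List (String × List Int)) (_tolerance : Int) : Prop :=
  ((PySem.Dict.mk valid_frame).get? "face").isSome = true ∧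
  ((PySem.Dict.mk valid_frame).get? "head").isSome = true ∧
  ((PySem.Dict.mk valid_frame).getD "face" [] ≠ [] ∨ (PySem.Dict.mk valid_frame).getD "head" [] ≠ [])
instance (valid_frame : List (String × List Int)) (tolerance : Int) : Decidable (Pre_get_valid_segments valid_frame tolerance) := by unfold Pre_get_valid_segments; infer_instance

def pvWitness_get_valid_segments : (List (String × List Int)) × Int :=
  ([("face", [1, 2, 9]), ("head", [3])], 5)

def Spec_get_valid_segments (valid_frame : List (String × List Int)) (tolerance : Int) (out : List (List Int)) : Prop := out = get_valid_segments_alt valid_frame tolerance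
instance (valid_frame : List (String × List Int)) (tolerance : Int) (out : List (List Int)) : Decidable (Spec_get_valid_segments valid_frame tolerance out) := by unfold Spec_get_valid_segments; infer_instance

-- ===== CLAIM (what is proved, stated in full; the proofs are below) =====
def Claim_equal_get_valid_segments : Prop := ∀ (valid_frame : List (String × List Int)) (tolerance : Int), Dom_get_valid_segments valid_frame tolerance → Pre_get_valid_segments valid_frame tolerance → Spec_get_valid_segments valid_frame tolerance (get_valid_segments valid_frame tolerance)

-- ===== LEMMAS AND PROOFS =====

def pvGroups (tol : Int) (cur : List Int) (prev : Int) : List Int → List (List Int)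
  | [] => [cur]
  | x :: xs => if x - prev ≤ tol then pvGroups tol (cur ++ [x]) x xs else cur :: pvGroups tol [x] x xs

theorem pvGroups_acc (tol : Int) (a cur : List Int) (prev : Int) (xs : List Int) :
    pvGroups tol (a ++ cur) prev xs =
      match pvGroups tol cur prev xs with
      | h :: r => (a ++ h) :: r
      | [] => [] := by
  induction xs generalizing cur prev with
  | nil => simp [pvGroups]
  | cons x xs ih =>
    by_cases h : x - prev ≤ tol
    · simpa [pvGroups, h, List.append_assoc] using ih (cur ++ [x]) x
    · simp [pvGroups, h]

theorem pvFoldA (tol : Int) (xs : List Int) :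
    ∀ (segs : List (List Int)) (cur : List Int) (prev : Int), cur ≠ [] →
    (if (xs.foldl
        (fun (st : List (List Int) × List Int × Int) x =>
          if x - st.2.2 ≤ tol then (st.1, st.2.1 ++ [x], x)
          else (st.1 ++ [st.2.1], [x], x)) (segs, cur, prev)).2.1 = []
     then (xs.foldl
        (fun (st : List (List Int) × List Int × Int) x =>
          if x - st.2.2 ≤ tol then (st.1, st.2.1 ++ [x], x)
          else (st.1 ++ [st.2.1], [x], x)) (segs, cur, prev)).1
     else (xs.foldl
        (fun (st : List (List Int) × List Int × Int) x =>
          if x - st.2.2 ≤ tol then (st.1, st.2.1 ++ [x], x)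
          else (st.1 ++ [st.2.1], [x], x)) (segs, cur, prev)).1 ++
          [(xs.foldl
        (fun (st : List (List Int) × List Int × Int) x =>
          if x - st.2.2 ≤ tol then (st.1, st.2.1 ++ [x], x)
          else (st.1 ++ [st.2.1], [x], x)) (segs, cur, prev)).2.1])
     = segs ++ pvGroups tol cur prev xs := by
  induction xs with
  | nil => intro segs cur prev hcur; simp [pvGroups, hcur]
  | cons x xs ih =>
    intro segs cur prev hcur
    by_cases h : x - prev ≤ tol
    · rw [show pvGroups tol cur prev (x :: xs) = pvGroups tol (cur ++ [x]) x xs from by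
        rw [pvGroups, if_pos h]]
      simpa only [List.foldl_cons, if_pos h] using ih segs (cur ++ [x]) x (by simp)
    · rw [show pvGroups tol cur prev (x :: xs) = cur :: pvGroups tol [x] x xs from by
        rw [pvGroups, if_neg h]]
      simpa only [List.foldl_cons, if_neg h, List.append_assoc, List.singleton_append]
        using ih (segs ++ [cur]) [x] x (by simp)

def pvCuts (tol : Int) : List Int → List Int
  | [] => []
  | [_] => []
  | a :: b :: t => (if tol < b - a then [(1 : Int)] else []) ++ (pvCuts tol (b :: t)).map (· + 1)

theorem pvCuts_nonneg (tol : Int) (l : List Int) : ∀ x ∈ pvCuts tol l, 0 ≤ x := by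
  induction l with
  | nil => simp [pvCuts]
  | cons a l ih =>
    cases l with
    | nil => simp [pvCuts]
    | cons b t =>
      intro x hx
      rw [pvCuts] at hx
      rcases List.mem_append.1 hx with h | h
      · split_ifs at h with hg
        · simp at h; omega
        · simp at h
      · obtain ⟨y, hy, rfl⟩ := List.mem_map.1 h
        have := ih y hy
        omega

theorem pvCutsEnum (tol : Int) (l : List Int) : ∀ (s : Int),
    ((PySem.List.enumerate (l.zip l.tail) s).filter
      (fun p => decide (tol < p.2.2 - p.2.1))).map (fun p => p.1 + 1)
    = (pvCuts tol l).map (· + s) := by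
  induction l with
  | nil => intro s; simp [pvCuts, PySem.List.enumerate_nil]
  | cons a l ih =>
    cases l with
    | nil => intro s; simp [pvCuts, PySem.List.enumerate_nil]
    | cons b t =>
      intro s
      have ih' := ih (s + 1)
      simp only [List.tail_cons] at ih' ⊢
      rw [show ((a :: b :: t).zip (b :: t)) = (a, b) :: ((b :: t).zip t) from by
        simp [List.zip]]
      rw [PySem.List.enumerate_cons, pvCuts]
      by_cases h : tol < b - a
      · rw [List.filter_cons, if_pos (by simpa using h), if_pos h]
        rw [List.map_cons, ih', List.map_append, List.map_map]
        simp only [List.map_cons, List.map_nil, List.singleton_append]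
        refine congrArg₂ List.cons (by ring) ?_
        apply List.map_congr_left
        intro x _
        simp [Function.comp]
        ring
      · rw [List.filter_cons, if_neg (by simpa using h), if_neg h]
        rw [ih', List.map_append, List.map_map]
        simp only [List.map_nil, List.nil_append]
        apply List.map_congr_left
        intro x _
        simp [Function.comp]
        ring

theorem pvSliceCons0 (a : Int) (l : List Int) (c : Int) (hc : 0 ≤ c) :
    PySem.List.slice (a :: l) (some 0) (some (c + 1)) = a :: PySem.List.slice l (some 0) (some c) := by
  rw [PySem.List.slice_toNat (ha := le_rfl) (hb := by omega),
      PySem.List.slice_toNat (ha := le_rfl) (hb := hc)]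
  simp only [Int.toNat_zero, List.drop_zero, Nat.sub_zero]
  rw [show (c + 1).toNat = c.toNat + 1 from by omega]
  simp

theorem pvSliceConsShift (a : Int) (l : List Int) (x y : Int) (hx : 0 ≤ x) (hy : 0 ≤ y) :
    PySem.List.slice (a :: l) (some (x + 1)) (some (y + 1)) = PySem.List.slice l (some x) (some y) := by
  rw [PySem.List.slice_toNat (ha := by omega) (hb := by omega),
      PySem.List.slice_toNat (ha := hx) (hb := hy)]
  rw [show (x + 1).toNat = x.toNat + 1 from by omega, show (y + 1).toNat = y.toNat + 1 from by omega]
  simp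

theorem pvSlicesB (tol : Int) (rest : List Int) : ∀ (p : Int),
    (((0 : Int) :: (pvCuts tol (p :: rest) ++ [((p :: rest).length : Int)])).zip
        (pvCuts tol (p :: rest) ++ [((p :: rest).length : Int)])).map
      (fun be => PySem.List.slice (p :: rest) (some be.1) (some be.2))
    = pvGroups tol [p] p rest := by
  induction rest with
  | nil =>
    intro p
    simp only [pvCuts, pvGroups, List.nil_append, List.length_cons, List.length_nil]
    rw [show (((0 + 1 : Nat)) : Int) = (0 : Int) + 1 from by norm_num]
    simp only [List.zip_cons_cons, List.zip_nil_right, List.map_cons, List.map_nil]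
    rw [pvSliceCons0 p [] 0 le_rfl]
    rw [PySem.List.slice_toNat (ha := le_rfl) (hb := le_rfl)]
    simp
  | cons b t ih =>
    intro a
    have hK : ∀ x ∈ pvCuts tol (b :: t) ++ [((b :: t).length : Int)], 0 ≤ x := by
      intro x hx
      rcases List.mem_append.1 hx with h | h
      · exact pvCuts_nonneg tol _ x h
      · simp at h; omega
    obtain ⟨k, K', hKK⟩ : ∃ k K', pvCuts tol (b :: t) ++ [((b :: t).length : Int)] = k :: K' := by
      rcases hE : pvCuts tol (b :: t) ++ [((b :: t).length : Int)] with _ | ⟨k, K'⟩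
      · simp at hE
      · exact ⟨k, K', rfl⟩
    have hk0 : 0 ≤ k := hK k (by rw [hKK]; exact List.mem_cons_self)
    have hK'0 : ∀ x ∈ K', 0 ≤ x := fun x hx => hK x (by rw [hKK]; exact List.mem_cons_of_mem _ hx)
    have hlen : ((a :: b :: t).length : Int) = ((b :: t).length : Int) + 1 := by
      simp
    have hmap : (pvCuts tol (b :: t)).map (· + 1) ++ [((a :: b :: t).length : Int)]
        = (k :: K').map (· + 1) := by
      rw [← hKK, List.map_append, hlen]
      simp
    have hKcons : ∀ x ∈ k :: K', 0 ≤ x := by rw [← hKK]; exact hK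
    by_cases h : tol < b - a
    · -- a big gap right after a: the first segment is [a]
      rw [pvCuts, if_pos h, List.append_assoc, List.singleton_append, hmap]
      rw [List.zip_cons_cons, List.map_cons]
      rw [show (1 : Int) :: (k :: K').map (· + 1) = ((0 : Int) :: k :: K').map (· + 1) from by simp]
      rw [List.zip_map, List.map_map]
      have htail : ∀ be ∈ ((0 : Int) :: k :: K').zip (k :: K'),
          ((fun be => PySem.List.slice (a :: b :: t) (some be.1) (some be.2)) ∘ Prod.map (· + 1) (· + 1)) be
          = (fun be => PySem.List.slice (b :: t) (some be.1) (some be.2)) be := by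
        intro be hbe
        obtain ⟨h1, h2⟩ := List.of_mem_zip hbe
        have hb1 : 0 ≤ be.1 := by
          rcases List.mem_cons.1 h1 with h1 | h1
          · omega
          · exact hKcons _ h1
        have hb2 : 0 ≤ be.2 := hKcons _ h2
        simp only [Function.comp_apply]
        exact pvSliceConsShift a (b :: t) be.1 be.2 hb1 hb2
      rw [List.map_congr_left htail]
      have ihb := ih b
      rw [hKK] at ihb
      rw [ihb]
      dsimp only
      rw [show PySem.List.slice (a :: b :: t) (some 0) (some 1) = [a] from by
        rw [show (1 : Int) = 0 + 1 from by norm_num, pvSliceCons0 a (b :: t) 0 le_rfl,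
            PySem.List.slice_toNat (ha := le_rfl) (hb := le_rfl)]
        simp]
      rw [pvGroups, if_neg (by omega)]
    · -- no gap: a joins the first segment of (b :: t)
      rw [pvCuts, if_neg h, List.nil_append, hmap, List.map_cons]
      rw [List.zip_cons_cons, List.map_cons]
      rw [show (k + 1) :: K'.map (· + 1) = (k :: K').map (· + 1) from by simp]
      rw [List.zip_map, List.map_map]
      have htail : ∀ be ∈ (k :: K').zip K',
          ((fun be => PySem.List.slice (a :: b :: t) (some be.1) (some be.2)) ∘ Prod.map (· + 1) (· + 1)) be
          = (fun be => PySem.List.slice (b :: t) (some be.1) (some be.2)) be := by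
        intro be hbe
        obtain ⟨h1, h2⟩ := List.of_mem_zip hbe
        simp only [Function.comp_apply]
        exact pvSliceConsShift a (b :: t) be.1 be.2 (hKcons _ h1) (hK'0 _ h2)
      rw [List.map_congr_left htail]
      have ihb := ih b
      rw [hKK, List.zip_cons_cons, List.map_cons] at ihb
      dsimp only at ihb ⊢
      rw [pvSliceCons0 a (b :: t) k hk0]
      rw [pvGroups, if_pos (by omega)]
      obtain ⟨s0, r0, hG⟩ : ∃ s0 r0, pvGroups tol [b] b t = s0 :: r0 := ⟨_, _, ihb.symm⟩
      rw [pvGroups_acc tol [a] [b] b t, hG]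
      rw [hG] at ihb
      injection ihb with hs hr
      dsimp only
      rw [← hs, ← hr]
      simp

theorem pvFoldAdd_ne_nil {α : Type} [BEq α] (t : List α) :
    ∀ (init : List α), init ≠ [] ∨ t ≠ [] → t.foldl PySem.Set.add init ≠ [] := by
  induction t with
  | nil => intro init h; simpa using h
  | cons x t ih =>
    intro init _
    apply ih
    left
    simp only [PySem.Set.add]
    split <;> simp_all
    · intro hinit; subst hinit; simp_all

-- ===== VERDICT (by name: the statement is the Claim_ definition above) =====
theorem get_valid_segments_spec : Claim_equal_get_valid_segments := by
  intro vf tol _ hpre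
  obtain ⟨-, -, hne⟩ := hpre
  unfold Spec_get_valid_segments get_valid_segments get_valid_segments_alt
  simp only []
  set face := (PySem.Dict.mk vf).getD "face" ([] : List Int) with hface
  set head := (PySem.Dict.mk vf).getD "head" ([] : List Int) with hhead
  have hofList : ∀ (l : List Int), l ≠ [] → PySem.Set.ofList l ≠ [] := by
    intro l hl
    exact pvFoldAdd_ne_nil l [] (Or.inr hl)
  have hunion : PySem.Set.union (PySem.Set.ofList face) (PySem.Set.ofList head) ≠ [] := by
    rcases hne with hf | hh
    · exact pvFoldAdd_ne_nil _ _ (Or.inl (hofList _ hf))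
    · exact pvFoldAdd_ne_nil _ _ (Or.inr (hofList _ hh))
  set pos := PySem.List.sorted (PySem.Set.union (PySem.Set.ofList face) (PySem.Set.ofList head)) (fun x => x) false with hpos
  have hposne : pos ≠ [] := by
    rw [hpos, Ne, PySem.List.sorted_eq_nil_iff]
    exact hunion
  obtain ⟨p0, rest, hcons⟩ := List.exists_cons_of_ne_nil hposne
  rw [hcons]
  dsimp only
  rw [pvFoldA tol rest [] [p0] p0 (by simp)]
  rw [PySem.List.slice_from_one, PySem.List.slice_from_one]
  rw [show List.map (fun (p : Int × Int × Int) => p.1 + 1)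
        (List.filter (fun p => decide (tol < p.2.2 - p.2.1))
          (PySem.List.enumerate ((p0 :: rest).zip (p0 :: rest).tail)))
      = pvCuts tol (p0 :: rest) from by simpa using pvCutsEnum tol (p0 :: rest) 0]
  rw [List.tail_cons, pvSlicesB tol rest p0]
  simp
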